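-- pv_equiv track=rewrite | github.com/Jeongyun-Jang/coding-test | pyalgo/best_Q2_암호문.py | solution
-- ===== SOURCE A (Python) =====
-- def solution(data):
--     arr = ['r', 'e', 'v']
--     result = 0
--     i = 0
--     while i < len(data) - 1:
--         if data[i] in arr:
--             # 다음 두 문자가 '10'인지 확인
--             if i + 2 < len(data) and data[i + 1] == '1' and data[i + 2] == '0':
--                 result += 10
--                 i += 3  # '10'을 처리했으므로 두 칸 이동
--             elif data[i + 1].isdigit():
--                 result += int(data[i + 1])
--                 i += 2  # 한 칸만 이동
--             else:
--                 i += 1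
--         else:
--             i += 1
--
--     month = result // 10
--     day = result % 10
--     return str(month) + '월 ' + str(day) + '일'
-- ===== SOURCE B (Python) =====
-- import re
--
-- _PAT = re.compile(r'[rev](10|\d)')  # '10' before '\d' so '10' wins over '1'
--
-- def solution(data):
--     result = sum(int(g) for g in _PAT.findall(data))
--     return str(result // 10) + '월 ' + str(result % 10) + '일'
-- ===== Notes on version B (the rewrite author's own statement) =====
-- stated objective: idiomatic
-- what changed: Replaced the manual while-loop with its three-way index advancement (i+=1/2/3) and per-branch digit checks by a single regex pass: sum int(g) over re.findall(r'[rev](10|\d)', data), relying on leftmost non-overlapping matching with the two-digit alternative tried first, then format the result.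
import Mathlib
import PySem

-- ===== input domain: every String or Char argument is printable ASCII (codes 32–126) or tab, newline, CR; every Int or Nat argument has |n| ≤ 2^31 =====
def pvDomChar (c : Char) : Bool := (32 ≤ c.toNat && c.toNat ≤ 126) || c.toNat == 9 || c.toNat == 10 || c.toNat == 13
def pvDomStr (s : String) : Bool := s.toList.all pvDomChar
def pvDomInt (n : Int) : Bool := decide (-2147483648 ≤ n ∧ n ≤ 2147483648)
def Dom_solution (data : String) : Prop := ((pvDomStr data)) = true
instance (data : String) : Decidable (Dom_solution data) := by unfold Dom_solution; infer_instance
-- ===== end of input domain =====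

-- B replaces A's index-juggling while-loop by a single regex pass: sum the captured groups of
-- re.findall(r'[rev](10|\d)', data) — more idiomatic, same cost.


-- ===== PORT A =====
-- arr = ['r', 'e', 'v']
def arrA : List Char := ['r', 'e', 'v']

-- the while-loop of A; i is the Python index (always ≥ 0 here, kept as Nat),
-- data[j] for 0 ≤ j < len is read with getD (exact: every access A makes is in range);
-- int(data[i+1]) on a digit char is its code minus 48 (exact for '0'-'9').
def loopA (cs : List Char) (i : Nat) (result : Int) : Int :=
  if i + 1 < cs.length then
    if cs.getD i ' ' ∈ arrA then
      if i + 2 < cs.length ∧ cs.getD (i+1) ' ' = '1' ∧ cs.getD (i+2) ' ' = '0' then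
        loopA cs (i+3) (result + 10)
      else if PySem.Chars.isdigit (cs.getD (i+1) ' ') then
        loopA cs (i+2) (result + (((cs.getD (i+1) ' ').toNat : Int) - 48))
      else loopA cs (i+1) result
    else loopA cs (i+1) result
  else result
termination_by cs.length - i

def solution (data : String) : String :=
  let result := loopA data.toList 0 0
  PySem.Int.toStr (PySem.Int.floordiv result 10) ++ "월 " ++ PySem.Int.toStr (PySem.Int.mod result 10) ++ "일"

-- ===== PORT B =====
-- c matches the character class [rev]
def trigB (c : Char) : Bool := c = 'r' || c = 'e' || c = 'v'

-- leftmost non-overlapping matching of the regex [rev](10|\d), summing int(group) over the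
-- matches: at each position try the '10' alternative first, then a single digit (\d = '0'-'9'
-- on the ASCII domain), otherwise advance one character; a match consumes its characters.
-- This is re.findall's semantics for this pattern, written out by hand (exact).
def sumMatches : List Char → Int
  | c :: d :: rest =>
    if trigB c && d == '1' && rest.head? == some '0' then 10 + sumMatches rest.tail
    else if trigB c && PySem.Chars.isdigit d then ((d.toNat : Int) - 48) + sumMatches rest
    else sumMatches (d :: rest)
  | _ => 0
termination_by cs => cs.length
decreasing_by all_goals (simp [List.length_tail]; try omega)

def solution_alt (data : String) : String :=
  let result := sumMatches data.toList
  PySem.Int.toStr (PySem.Int.floordiv result 10) ++ "월 " ++ PySem.Int.toStr (PySem.Int.mod result 10) ++ "일"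

-- ===== PRECONDITION & SPEC =====
def Spec_solution (data : String) (out : String) : Prop := out = solution_alt data
instance (data : String) (out : String) : Decidable (Spec_solution data out) := by unfold Spec_solution; infer_instance

-- ===== CLAIM (what is proved, stated in full; the proofs are below) =====
def Claim_equal_solution : Prop := ∀ (data : String), Dom_solution data → Spec_solution data (solution data)

-- ===== LEMMAS AND PROOFS =====

lemma drop_cons_getD (cs : List Char) (i : Nat) (h : i < cs.length) :
    cs.drop i = cs.getD i ' ' :: cs.drop (i+1) := by
  rw [List.drop_eq_getElem_cons h]
  simp [List.getD_eq_getElem?_getD, List.getElem?_eq_getElem h]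

lemma trig_iff (c : Char) : trigB c = true ↔ c ∈ arrA := by
  simp [trigB, arrA, or_assoc]

lemma sumMatches_short (cs : List Char) (h : cs.length ≤ 1) : sumMatches cs = 0 := by
  rw [sumMatches.eq_def]
  match cs, h with
  | [], _ => simp
  | [c], _ => simp
lemma sumMatches_m10 (c d : Char) (rest : List Char) (hc : trigB c = true) (hd : d = '1')
    (h0 : rest.head? = some '0') :
    sumMatches (c :: d :: rest) = 10 + sumMatches rest.tail := by
  rw [sumMatches]; simp [hc, hd, h0]
lemma sumMatches_dig (c d : Char) (rest : List Char) (hc : trigB c = true)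
    (hnot : ¬(d = '1' ∧ rest.head? = some '0')) (hd : PySem.Chars.isdigit d = true) :
    sumMatches (c :: d :: rest) = ((d.toNat : Int) - 48) + sumMatches rest := by
  rw [sumMatches]
  rw [if_neg (by simp [hc]; intro h1; simp [h1] at hnot ⊢; intro hx; exact hnot hx)]
  simp [hc, hd]
lemma sumMatches_skip (c d : Char) (rest : List Char)
    (hno : ¬(trigB c = true ∧ PySem.Chars.isdigit d = true)) :
    sumMatches (c :: d :: rest) = sumMatches (d :: rest) := by
  by_cases hc : trigB c = true
  · have hd : PySem.Chars.isdigit d = false := by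
      cases hx : PySem.Chars.isdigit d
      · rfl
      · exact absurd ⟨hc, hx⟩ hno
    have hd1 : d ≠ '1' := by intro h; subst h; simp [PySem.Chars.isdigit] at hd
    rw [sumMatches]; simp [hc, hd, hd1]
  · have hc' : trigB c = false := by cases hx : trigB c; rfl; exact absurd hx hc
    rw [sumMatches]; simp [hc']
lemma loopA_eq (cs : List Char) (i : Nat) (r : Int) :
    loopA cs i r = r + sumMatches (cs.drop i) := by
  fun_induction loopA with
  | case1 i r h hc hcond ih =>
    obtain ⟨h2, hd1, hd0⟩ := hcond
    rw [ih, drop_cons_getD cs i (by omega), drop_cons_getD cs (i+1) (by omega),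
        drop_cons_getD cs (i+2) (by omega),
        sumMatches_m10 _ _ _ ((trig_iff _).mpr hc) hd1 (by simpa [List.getD_eq_getElem?_getD] using hd0)]
    simp [List.tail_cons]
    ring
  | case2 i r h hc hcond hd ih =>
    have hnot : ¬(cs.getD (i+1) ' ' = '1' ∧ (cs.drop (i+2)).head? = some '0') := by
      rintro ⟨h1, h0⟩
      rw [List.head?_drop] at h0
      have h2 : i + 2 < cs.length := by
        by_contra hx
        rw [List.getElem?_eq_none (by omega)] at h0
        simp at h0
      apply hcond
      refine ⟨h2, h1, ?_⟩
      rw [List.getElem?_eq_getElem h2] at h0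
      simpa [List.getD_eq_getElem?_getD, List.getElem?_eq_getElem h2] using h0
    rw [ih, drop_cons_getD cs i (by omega), drop_cons_getD cs (i+1) (by omega),
        sumMatches_dig _ _ _ ((trig_iff _).mpr hc) hnot hd]
    ring
  | case3 i r h hc hcond hd ih =>
    rw [ih, drop_cons_getD cs i (by omega), drop_cons_getD cs (i+1) (by omega),
        sumMatches_skip _ _ _ (by rintro ⟨_, hx⟩; exact hd hx),
        ← drop_cons_getD cs (i+1) (by omega)]
  | case4 i r h hc ih =>
    rw [ih, drop_cons_getD cs i (by omega), drop_cons_getD cs (i+1) (by omega),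
        sumMatches_skip _ _ _ (by rintro ⟨hx, _⟩; exact hc ((trig_iff _).mp hx)),
        ← drop_cons_getD cs (i+1) (by omega)]
  | case5 i r h =>
    rw [sumMatches_short _ (by simp [List.length_drop]; omega)]
    ring

-- ===== VERDICT (by name: the statement is the Claim_ definition above) =====
theorem solution_spec : Claim_equal_solution := by
  intro data _
  unfold Spec_solution solution solution_alt
  rw [loopA_eq]
  simp
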